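-- pv_equiv track=rewrite | github.com/Hanshan-XY/MetacouplingLLM | src/metacouplingllm/visualization/worldmap.py | _classify_countries
-- ===== SOURCE A (Python) =====
-- def _classify_countries(
--     focal_code: str,
--     pericoupled_codes: set[str],
--     shapefile_codes: set[str],
--     db_codes: set[str],
--     mentioned_codes: set[str] | None = None,
-- ) -> dict[str, str]:
--     """Classify every country in the shapefile by coupling type.
--
--     Parameters
--     ----------
--     focal_code:
--         ISO code of the focal (intracoupling) country.
--     pericoupled_codes:
--         Codes of countries pericoupled with the focal country.
--     shapefile_codes:
--         All ISO codes present in the shapefile.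
--     db_codes:
--         All ISO codes known to this package (from ``ISO_ALPHA3_NAMES``).
--     mentioned_codes:
--         When provided, only countries in this set (or that are pericoupled
--         with the focal country) will be classified as telecoupling.
--         Countries not in this set are classified as ``"na"`` (grey).
--         When ``None``, all DB countries are coloured (legacy behaviour).
--
--     Returns
--     -------
--     ``{iso_code: "intracoupling"|"pericoupling"|"telecoupling"|"na"}``
--     """
--     classification: dict[str, str] = {}
--     for code in shapefile_codes:
--         if code == focal_code:
--             classification[code] = "intracoupling"
--         elif code in pericoupled_codes:
--             classification[code] = "pericoupling"
--         elif mentioned_codes is not None: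
--             # Analysis-driven mode: only color countries mentioned in analysis
--             if code in mentioned_codes:
--                 classification[code] = "telecoupling"
--             else:
--                 classification[code] = "na"
--         elif code in db_codes:
--             classification[code] = "telecoupling"
--         else:
--             classification[code] = "na"
--     return classification
-- ===== SOURCE B (Python) =====
-- def _classify_countries(
--     focal_code: str,
--     pericoupled_codes: set[str],
--     shapefile_codes: set[str],
--     db_codes: set[str],
--     mentioned_codes: set[str] | None = None,
-- ) -> dict[str, str]:
--     """Classify every shapefile country by coupling type.
--
--     Builds the whole map as "na" first, then overwrites categories in
--     increasing priority order (telecoupling < pericoupling < intracoupling),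
--     so later passes reproduce the original elif priority.
--     """
--     classification = {code: "na" for code in shapefile_codes}
--     coloured = mentioned_codes if mentioned_codes is not None else db_codes
--     for code in coloured & shapefile_codes:
--         classification[code] = "telecoupling"
--     for code in pericoupled_codes & shapefile_codes:
--         classification[code] = "pericoupling"
--     if focal_code in shapefile_codes:
--         classification[focal_code] = "intracoupling"
--     return classification
-- ===== Notes on version B (the rewrite author's own statement) =====
-- stated objective: simpler
-- what changed: Replaces the per-country elif chain with a default dict comprehension ('na' for all shapefile codes) followed by set-intersection overwrite passes in increasing priority (telecoupling, pericoupling, intracoupling).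
import Mathlib
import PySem

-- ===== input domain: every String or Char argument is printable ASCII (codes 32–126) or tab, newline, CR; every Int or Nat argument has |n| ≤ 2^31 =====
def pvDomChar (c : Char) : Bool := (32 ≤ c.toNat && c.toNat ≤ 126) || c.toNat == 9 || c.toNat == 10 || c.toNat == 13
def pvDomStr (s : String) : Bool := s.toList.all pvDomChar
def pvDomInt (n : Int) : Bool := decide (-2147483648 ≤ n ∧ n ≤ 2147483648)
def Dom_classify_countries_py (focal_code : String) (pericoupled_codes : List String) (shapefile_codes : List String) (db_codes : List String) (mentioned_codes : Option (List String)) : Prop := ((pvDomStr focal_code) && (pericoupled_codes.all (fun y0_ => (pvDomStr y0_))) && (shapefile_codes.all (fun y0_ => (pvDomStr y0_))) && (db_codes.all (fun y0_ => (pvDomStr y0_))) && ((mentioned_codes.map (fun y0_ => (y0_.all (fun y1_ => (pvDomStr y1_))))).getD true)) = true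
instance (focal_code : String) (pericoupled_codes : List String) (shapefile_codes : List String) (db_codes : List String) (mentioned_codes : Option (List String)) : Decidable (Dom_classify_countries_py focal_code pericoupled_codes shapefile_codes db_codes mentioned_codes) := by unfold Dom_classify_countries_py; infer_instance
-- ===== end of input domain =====

-- B replaces A's per-country elif chain by a default "na" map plus set-intersection overwrite
-- passes in increasing priority order: a simpler decomposition, not a speed change.

-- ===== PORT A =====
def classify_countries_py (focal_code : String) (pericoupled_codes : List String) (shapefile_codes : List String) (db_codes : List String) (mentioned_codes : Option (List String)) : List (String × String) :=
  (shapefile_codes.foldl (fun (classification : PySem.Dict String String) code =>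
      if code == focal_code then classification.insert code "intracoupling"
      else if pericoupled_codes.contains code then classification.insert code "pericoupling"
      else match mentioned_codes with
        | some m => if m.contains code then classification.insert code "telecoupling"
                    else classification.insert code "na"
        | none => if db_codes.contains code then classification.insert code "telecoupling"
                  else classification.insert code "na")
    PySem.Dict.empty).items

-- ===== PORT B =====
def classify_countries_py_alt (focal_code : String) (pericoupled_codes : List String) (shapefile_codes : List String) (db_codes : List String) (mentioned_codes : Option (List String)) : List (String × String) :=
  let base : PySem.Dict String String :=
    shapefile_codes.foldl (fun d code => d.insert code "na") PySem.Dict.empty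
  let coloured := mentioned_codes.getD db_codes
  let d1 := (PySem.Set.inter coloured shapefile_codes).foldl
              (fun d code => d.insert code "telecoupling") base
  let d2 := (PySem.Set.inter pericoupled_codes shapefile_codes).foldl
              (fun d code => d.insert code "pericoupling") d1
  let d3 := if shapefile_codes.contains focal_code then d2.insert focal_code "intracoupling" else d2
  d3.items

-- ===== PRECONDITION & SPEC =====
def Spec_classify_countries_py (focal_code : String) (pericoupled_codes : List String) (shapefile_codes : List String) (db_codes : List String) (mentioned_codes : Option (List String)) (out : List (String × String)) : Prop := out = classify_countries_py_alt focal_code pericoupled_codes shapefile_codes db_codes mentioned_codes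
instance (focal_code : String) (pericoupled_codes : List String) (shapefile_codes : List String) (db_codes : List String) (mentioned_codes : Option (List String)) (out : List (String × String)) : Decidable (Spec_classify_countries_py focal_code pericoupled_codes shapefile_codes db_codes mentioned_codes out) := by unfold Spec_classify_countries_py; infer_instance

-- ===== CLAIM (what is proved, stated in full; the proofs are below) =====
def Claim_equal_classify_countries_py : Prop := ∀ (focal_code : String) (pericoupled_codes : List String) (shapefile_codes : List String) (db_codes : List String) (mentioned_codes : Option (List String)), Dom_classify_countries_py focal_code pericoupled_codes shapefile_codes db_codes mentioned_codes → Spec_classify_countries_py focal_code pericoupled_codes shapefile_codes db_codes mentioned_codes (classify_countries_py focal_code pericoupled_codes shapefile_codes db_codes mentioned_codes)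

-- ===== LEMMAS AND PROOFS =====

-- A's classification value for one code, as a function of the code only
-- (coloured stands for mentioned_codes when given, else db_codes).
def pvVal (focal_code : String) (pericoupled_codes coloured : List String) (code : String) : String :=
  if code == focal_code then "intracoupling"
  else if pericoupled_codes.contains code then "pericoupling"
  else if coloured.contains code then "telecoupling"
  else "na"

-- lookup after a fold of inserts whose value depends only on the key
lemma getD_foldl_insert_fn (g : String → String) (xs : List String) (d : PySem.Dict String String) (k : String) (dflt : String) :
    (xs.foldl (fun d c => d.insert c (g c)) d).getD k dflt
      = if k ∈ xs then g k else d.getD k dflt := by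
  induction xs generalizing d with
  | nil => simp
  | cons x xs ih =>
    simp only [List.foldl_cons, ih, PySem.Dict.getD_insert, List.mem_cons]
    by_cases hx : k ∈ xs <;> by_cases hk : k = x <;> simp [hx, hk]

lemma set_update_of_subset (s l : List String) (h : ∀ x ∈ l, x ∈ s) :
    PySem.Set.update s l = s := by
  rw [PySem.Set.update_eq_append_filter]
  have hnil : List.filter (fun y => !(PySem.Set.contains s y)) (PySem.Set.ofList l) = [] := by
    rw [List.filter_eq_nil_iff]
    intro y hy
    have hy' : y ∈ s := h y ((PySem.Set.mem_ofList l y).mp hy)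
    simpa using hy'
  rw [hnil, List.append_nil]

-- keys of a fold of key-determined inserts over xs: exactly the distinct elements of xs
lemma keys_build (g : String → String) (xs : List String) (d : PySem.Dict String String) :
    (xs.foldl (fun d c => d.insert c (g c)) d).keys = PySem.Set.update d.keys xs :=
  PySem.Dict.keys_foldl_insert xs (fun _ c => g c) d

-- the whole equality, after A's elif chain has been reduced to pvVal and
-- mentioned_codes has been resolved to the coloured set
lemma items_build_eq (focal : String) (peri shape coloured : List String) :
    (shape.foldl (fun d c => d.insert c (pvVal focal peri coloured c)) PySem.Dict.empty).items
      = (let base : PySem.Dict String String :=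
           shape.foldl (fun d code => d.insert code "na") PySem.Dict.empty
         let d1 := (PySem.Set.inter coloured shape).foldl
                     (fun d code => d.insert code "telecoupling") base
         let d2 := (PySem.Set.inter peri shape).foldl
                     (fun d code => d.insert code "pericoupling") d1
         let d3 := if shape.contains focal then d2.insert focal "intracoupling" else d2
         d3.items) := by
  simp only []
  set DA := shape.foldl (fun d c => d.insert c (pvVal focal peri coloured c)) PySem.Dict.empty with hDA
  set base : PySem.Dict String String := shape.foldl (fun d code => d.insert code "na") PySem.Dict.empty with hbase
  set d1 := (PySem.Set.inter coloured shape).foldl (fun d code => d.insert code "telecoupling") base with hd1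
  set d2 := (PySem.Set.inter peri shape).foldl (fun d code => d.insert code "pericoupling") d1 with hd2
  set d3 := if shape.contains focal then d2.insert focal "intracoupling" else d2 with hd3
  have hkA : DA.keys = PySem.Set.ofList shape := by
    rw [hDA, keys_build]; simp [PySem.Set.update_nil_left]
  have hkbase : base.keys = PySem.Set.ofList shape := by
    rw [hbase, keys_build (fun _ => "na")]; simp [PySem.Set.update_nil_left]
  have hk1 : d1.keys = PySem.Set.ofList shape := by
    rw [hd1, keys_build (fun _ => "telecoupling"), hkbase]
    exact set_update_of_subset _ _ (fun x hx => by
      have := (PySem.Set.mem_inter coloured shape x).mp hx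
      exact (PySem.Set.mem_ofList shape x).mpr this.2)
  have hk2 : d2.keys = PySem.Set.ofList shape := by
    rw [hd2, keys_build (fun _ => "pericoupling"), hk1]
    exact set_update_of_subset _ _ (fun x hx => by
      have := (PySem.Set.mem_inter peri shape x).mp hx
      exact (PySem.Set.mem_ofList shape x).mpr this.2)
  have hk3 : d3.keys = PySem.Set.ofList shape := by
    rw [hd3]
    by_cases hf : shape.contains focal
    · have hc2 : d2.contains focal = true := by
        rw [PySem.Dict.contains_iff_mem_keys, hk2, PySem.Set.mem_ofList]
        exact List.contains_iff_mem.mp hf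
      rw [if_pos hf, PySem.Dict.keys_insert_of_contains d2 "intracoupling" hc2, hk2]
    · rw [if_neg hf]; exact hk2
  have hgA : ∀ k ∈ shape, DA.getD k "" = pvVal focal peri coloured k := by
    intro k hk
    rw [hDA, getD_foldl_insert_fn, if_pos hk]
  have hg3 : ∀ k ∈ shape, d3.getD k "" = pvVal focal peri coloured k := by
    intro k hk
    have hchain : d2.getD k "" =
        (if k ∈ PySem.Set.inter peri shape then "pericoupling"
         else if k ∈ PySem.Set.inter coloured shape then "telecoupling" else "na") := by
      rw [hd2, getD_foldl_insert_fn (fun _ => "pericoupling"), hd1,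
          getD_foldl_insert_fn (fun _ => "telecoupling"), hbase,
          getD_foldl_insert_fn (fun _ => "na"), if_pos hk]
    rw [hd3]
    by_cases hkf : k = focal
    · subst hkf
      rw [if_pos (List.contains_iff_mem.mpr hk), PySem.Dict.getD_insert, if_pos rfl]
      simp [pvVal]
    · have hne : pvVal focal peri coloured k =
          (if k ∈ PySem.Set.inter peri shape then "pericoupling"
           else if k ∈ PySem.Set.inter coloured shape then "telecoupling" else "na") := by
        simp only [pvVal, PySem.Set.mem_inter, beq_iff_eq, if_neg hkf]
        by_cases hp : k ∈ peri <;> by_cases hc : k ∈ coloured <;>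
          simp [hp, hc, hk]
      by_cases hf : shape.contains focal
      · rw [if_pos hf, PySem.Dict.getD_insert, if_neg hkf, hchain, hne]
      · rw [if_neg hf, hchain, hne]
  have hndA : DA.keys.Nodup := by rw [hkA]; exact PySem.Set.nodup_ofList shape
  have hnd3 : d3.keys.Nodup := by rw [hk3]; exact PySem.Set.nodup_ofList shape
  rw [PySem.Dict.items_eq_map_keys DA hndA "", PySem.Dict.items_eq_map_keys d3 hnd3 "",
      hkA, hk3]
  refine List.map_congr_left (fun k hk => ?_)
  have hks : k ∈ shape := (PySem.Set.mem_ofList shape k).mp hk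
  rw [hgA k hks, hg3 k hks]

-- ===== VERDICT (by name: the statement is the Claim_ definition above) =====
theorem classify_countries_py_spec : Claim_equal_classify_countries_py := by
  intro focal peri shape db mentioned hdom
  clear hdom
  unfold Spec_classify_countries_py classify_countries_py classify_countries_py_alt
  rcases mentioned with _ | m
  · have hstep : (fun (classification : PySem.Dict String String) code =>
        if code == focal then classification.insert code "intracoupling"
        else if peri.contains code then classification.insert code "pericoupling"
        else match (none : Option (List String)) with
          | some m => if m.contains code then classification.insert code "telecoupling"
                      else classification.insert code "na"
          | none => if db.contains code then classification.insert code "telecoupling"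
                    else classification.insert code "na")
        = (fun (d : PySem.Dict String String) c => d.insert c (pvVal focal peri db c)) := by
      funext d c
      simp only [pvVal]
      split_ifs <;> rfl
    rw [hstep]
    exact items_build_eq focal peri shape db
  · have hstep : (fun (classification : PySem.Dict String String) code =>
        if code == focal then classification.insert code "intracoupling"
        else if peri.contains code then classification.insert code "pericoupling"
        else match some m with
          | some m => if m.contains code then classification.insert code "telecoupling"
                      else classification.insert code "na"
          | none => if db.contains code then classification.insert code "telecoupling"
                    else classification.insert code "na")
        = (fun (d : PySem.Dict String String) c => d.insert c (pvVal focal peri m c)) := by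
      funext d c
      simp only [pvVal]
      split_ifs <;> rfl
    rw [hstep]
    exact items_build_eq focal peri shape m
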